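-- pv_equiv track=rewrite | github.com/jack7141/StudyProject | code_test/Practice/기능개발.py | solution
-- ===== SOURCE A (Python) =====
-- def solution(n, m, x_axis, y_axis):
--     x_big = 0
--     if len(x_axis) == 1:
--         x_big = x_axis[0]
--         x_big = x_big if n - x_axis[0] <= x_big else n - x_axis[0]
--     elif len(x_axis) == 0:
--         x_big = n
--     else:
--         for index_x in range(len(x_axis)):
--             if index_x == 0:
--                 x_big = x_axis[index_x]
--             elif index_x == len(x_axis) - 1:
--                 if x_axis[index_x] - x_axis[index_x - 1] <= x_big:
--                     x_big = x_big
--                 else: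
--                     x_big = x_axis[index_x] - x_axis[index_x - 1]
--                 if n - x_axis[index_x] <= x_big:
--                     x_big = x_big
--                 else:
--                     x_big = n - x_axis[index_x]
--             else:
--                 if x_axis[index_x] - x_axis[index_x - 1] <= x_big:
--                     x_big = x_big
--                 else:
--                     x_big = x_axis[index_x] - x_axis[index_x - 1]
--     y_big = 0
--     if len(y_axis) == 1:
--         y_big = y_axis[0]
--         y_big = y_big if m - y_axis[0] <= y_big else m - y_axis[0]
--     elif len(y_axis) == 0:
--         y_big = m
--     else:
--         for index_y in range(len(y_axis)):
--
--             if index_y == 0: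
--                 y_big = y_axis[index_y]
--             elif index_y == len(y_axis) - 1:
--                 y_big = y_big if y_axis[index_y] - y_axis[index_y - 1] <= y_big else y_axis[index_y] - y_axis[
--                     index_y - 1]
--                 y_big = y_big if m - y_axis[index_y] <= y_big else m - y_axis[index_y]
--             else:
--                 y_big = y_big if y_axis[index_y] - y_axis[index_y - 1] <= y_big else y_axis[index_y] - y_axis[index_y - 1]
--     answer = x_big * y_big
--     return answer
-- ===== SOURCE B (Python) =====
-- def solution(n, m, x_axis, y_axis):
--     def go(pts, prev, nxt):
--         # largest gap among the segment boundaries prev, pts..., nxt (divide & conquer)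
--         if not pts:
--             return nxt - prev
--         mid = len(pts) // 2
--         q = pts[mid]
--         left = go(pts[:mid], prev, q)
--         right = go(pts[mid + 1:], q, nxt)
--         return left if left >= right else right
--     return go(list(x_axis), 0, n) * go(list(y_axis), 0, m)
-- ===== Notes on version B (the rewrite author's own statement) =====
-- stated objective: alternative
-- what changed: Replaces A's linear indexed scan with first/last/middle branching by a divide-and-conquer recursion per axis: split the point list at its middle element, recurse on the two halves with boundary arguments (prev, nxt) seeded with 0 and the axis total, and combine with max.
import Mathlib
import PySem

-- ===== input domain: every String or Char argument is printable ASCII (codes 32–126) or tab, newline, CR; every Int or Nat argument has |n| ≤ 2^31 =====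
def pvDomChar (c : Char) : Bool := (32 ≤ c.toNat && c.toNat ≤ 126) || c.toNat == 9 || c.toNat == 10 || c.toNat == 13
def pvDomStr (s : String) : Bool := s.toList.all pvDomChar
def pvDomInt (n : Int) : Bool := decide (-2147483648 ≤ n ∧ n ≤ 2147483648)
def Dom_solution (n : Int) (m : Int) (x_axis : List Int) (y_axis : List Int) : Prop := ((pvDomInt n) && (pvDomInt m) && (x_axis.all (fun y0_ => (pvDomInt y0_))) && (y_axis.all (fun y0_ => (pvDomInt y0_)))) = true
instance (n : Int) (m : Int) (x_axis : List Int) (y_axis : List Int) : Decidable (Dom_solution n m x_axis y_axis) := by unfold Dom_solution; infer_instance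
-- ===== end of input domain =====

-- B replaces A's linear indexed scan (with its first/last/middle branches and separate length-0/1
-- cases) by a per-axis divide-and-conquer recursion on the point list; objective: alternative.

-- ===== PORT A =====
-- Python A writes the identical index-branching block twice (once for x, once for y);
-- pvLoopBodyA is the loop body of that block and pvAxisBigA the whole block, transliterated verbatim.
def pvLoopBodyA (total : Int) (pts : List Int) (big : Int) (i : Int) : Int :=
  if i = 0 then PySem.List.pyGetD pts i 0
  else if i = (pts.length : Int) - 1 then
    let b1 := if PySem.List.pyGetD pts i 0 - PySem.List.pyGetD pts (i - 1) 0 ≤ big then big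
              else PySem.List.pyGetD pts i 0 - PySem.List.pyGetD pts (i - 1) 0
    if total - PySem.List.pyGetD pts i 0 ≤ b1 then b1 else total - PySem.List.pyGetD pts i 0
  else if PySem.List.pyGetD pts i 0 - PySem.List.pyGetD pts (i - 1) 0 ≤ big then big
       else PySem.List.pyGetD pts i 0 - PySem.List.pyGetD pts (i - 1) 0

def pvAxisBigA (total : Int) (pts : List Int) : Int :=
  if pts.length = 1 then
    let b := PySem.List.pyGetD pts 0 0
    if total - PySem.List.pyGetD pts 0 0 ≤ b then b else total - PySem.List.pyGetD pts 0 0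
  else if pts.length = 0 then total
  else (PySem.List.pyRange 0 (pts.length : Int) 1).foldl (pvLoopBodyA total pts) 0

def solution (n : Int) (m : Int) (x_axis : List Int) (y_axis : List Int) : Int :=
  pvAxisBigA n x_axis * pvAxisBigA m y_axis

-- ===== PORT B =====
-- Source B's go helper: divide and conquer — split at the middle point, recurse on both halves
-- with the segment boundaries (prev, nxt), combine with the larger of the two results.
def pvGo : List Int → Int → Int → Int
  | [], prev, nxt => nxt - prev
  | p :: rest, prev, nxt =>
      let mid := (p :: rest).length / 2
      let q := (p :: rest).getD mid 0        -- pts[mid]; mid is in range so the default is never used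
      let left := pvGo ((p :: rest).take mid) prev q
      let right := pvGo ((p :: rest).drop (mid + 1)) q nxt
      if left ≥ right then left else right
 termination_by pts _ _ => pts.length
 decreasing_by
  · simp only [List.length_take, List.length_cons]; omega
  · simp only [List.length_drop, List.length_cons]; omega

def solution_alt (n : Int) (m : Int) (x_axis : List Int) (y_axis : List Int) : Int :=
  pvGo x_axis 0 n * pvGo y_axis 0 m

-- ===== PRECONDITION & SPEC =====
def Spec_solution (n : Int) (m : Int) (x_axis : List Int) (y_axis : List Int) (out : Int) : Prop := out = solution_alt n m x_axis y_axis
instance (n : Int) (m : Int) (x_axis : List Int) (y_axis : List Int) (out : Int) : Decidable (Spec_solution n m x_axis y_axis out) := by unfold Spec_solution; infer_instance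

-- ===== CLAIM (what is proved, stated in full; the proofs are below) =====
def Claim_equal_solution : Prop := ∀ (n : Int) (m : Int) (x_axis : List Int) (y_axis : List Int), Dom_solution n m x_axis y_axis → Spec_solution n m x_axis y_axis (solution n m x_axis y_axis)

-- ===== LEMMAS AND PROOFS =====

-- proof-side reference value: the boundary-gap list of an axis and its maximum
def pvGaps (prev nxt : Int) (pts : List Int) : List Int :=
  List.zipWith (fun a b => b - a) (prev :: (pts ++ [nxt])) (pts ++ [nxt])

def pvMaxOf : List Int → Int
  | [] => 0
  | d :: ds => ds.foldl max d

-- Python's `x if c <= x0 then keep else take` pattern is a max.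
theorem pv_ite_max (b x : Int) : (if x ≤ b then b else x) = max b x := by
  rw [max_def]; split_ifs <;> omega

-- adjacent-difference list of (c :: pts) ++ [t] splits off its last entry
theorem pv_diffs_concat (c t : Int) (pts : List Int) (hp : pts ≠ []) :
    List.zipWith (fun a b => b - a) (c :: (pts ++ [t])) (pts ++ [t]) =
      List.zipWith (fun a b => b - a) (c :: pts) pts ++ [t - pts.getLast hp] := by
  induction pts generalizing c with
  | nil => exact absurd rfl hp
  | cons a rest ih =>
    cases rest with
    | nil => simp
    | cons b rs =>
      have h : (b :: rs : List Int) ≠ [] := by simp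
      rw [List.cons_append, List.zipWith_cons_cons, ih a h, List.getLast_cons h]; simp

-- entries of the adjacent-difference list of 0 :: pts
theorem pv_E_getElem (pts : List Int) (j : Nat) (h1 : 1 ≤ j) (hj : j < pts.length)
    (hlen : j < (List.zipWith (fun a b => b - a) ((0 : Int) :: pts) pts).length) :
    (List.zipWith (fun a b => b - a) ((0 : Int) :: pts) pts)[j] =
      pts[j] - pts[j - 1]'(by omega) := by
  obtain ⟨k, rfl⟩ : ∃ k, j = k + 1 := ⟨j - 1, by omega⟩
  simp [List.getElem_zipWith]

-- folding max over a nonempty list peels its last element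
theorem pv_foldl_max_last (init : Int) (l : List Int) (h : l ≠ []) :
    l.foldl max init = max (l.dropLast.foldl max init) (l.getLast h) := by
  conv_lhs => rw [← List.dropLast_append_getLast h]
  simp [List.foldl_append]

-- A's axis block computes the maximum of the boundary-gap list
theorem pv_axis_eq (total : Int) (pts : List Int) :
    pvAxisBigA total pts = pvMaxOf (pvGaps 0 total pts) := by
  match pts with
  | [] => simp [pvAxisBigA, pvGaps, pvMaxOf]
  | [a] =>
    simp [pvAxisBigA, pvGaps, pvMaxOf, PySem.List.pyGetD_zero_cons]
    rw [max_def]; split_ifs <;> omega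
  | p :: q :: rest =>
    have hN : (0:Int) ≤ (rest.length : Int) := Int.natCast_nonneg _
    have hlen2 : (((p :: q :: rest : List Int)).length : Int) = (rest.length : Int) + 2 := by
      simp; ring
    -- the adjacent-difference lists
    have hE : List.zipWith (fun a b => b - a) ((0:Int) :: (p :: q :: rest)) (p :: q :: rest)
        = p :: List.zipWith (fun a b => b - a) (p :: q :: rest) (q :: rest) := by simp
    have hElen : (List.zipWith (fun a b => b - a) ((0:Int) :: (p :: q :: rest)) (p :: q :: rest)).length
        = rest.length + 2 := by simp
    have hEtlen : (List.zipWith (fun a b => b - a) ((p : Int) :: q :: rest) (q :: rest)).length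
        = rest.length + 1 := by simp
    -- ===== A side =====
    unfold pvAxisBigA
    rw [if_neg (by simp), if_neg (by simp)]
    rw [hlen2]
    rw [PySem.List.pyRange_one_cons (by omega : (0:Int) < (rest.length : Int) + 2), List.foldl_cons]
    have hbody0 : pvLoopBodyA total (p :: q :: rest) 0 0 = p := by
      simp [pvLoopBodyA, PySem.List.pyGetD_zero_cons]
    rw [hbody0]
    rw [show ((rest.length : Int) + 2) = ((rest.length : Int) + 1) + 1 from by ring,
        PySem.List.pyRange_one_succ_right (by omega), List.foldl_append, List.foldl_cons,
        List.foldl_nil]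
    -- the middle of the loop folds max over the inner adjacent differences
    have hmid : (PySem.List.pyRange 1 ((rest.length : Int) + 1) 1).foldl
          (pvLoopBodyA total (p :: q :: rest)) p
        = (PySem.List.pyRange 1 ((rest.length : Int) + 1) 1).foldl
          (fun acc j => max acc (PySem.List.pyGetD
            ((List.zipWith (fun a b => b - a) ((0:Int) :: (p :: q :: rest)) (p :: q :: rest)).take
              (rest.length + 1)) j 0)) p := by
      apply PySem.List.foldl_congr_mem
      intro acc i hi
      rw [PySem.List.mem_pyRange_one] at hi
      unfold pvLoopBodyA
      rw [if_neg (by omega), if_neg (by rw [hlen2]; omega), pv_ite_max]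
      congr 1
      have h0 : (0:Int) ≤ i := by omega
      have hiq : (i - 1).toNat = i.toNat - 1 := by omega
      rw [PySem.List.pyGetD_eq_getElem _ _ h0 (by rw [hlen2]; omega),
          PySem.List.pyGetD_eq_getElem _ _ (by omega : (0:Int) ≤ i - 1) (by rw [hlen2]; omega),
          PySem.List.pyGetD_eq_getElem _ _ h0
            (by rw [List.length_take, hElen]; push_cast; omega),
          List.getElem_take, pv_E_getElem _ _ (by omega) (by simp; omega)]
      simp only [hiq]
    have hEmidlen : ((List.zipWith (fun a b => b - a) ((0:Int) :: (p :: q :: rest))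
          (p :: q :: rest)).take (rest.length + 1)).length = rest.length + 1 := by
      rw [List.length_take, hElen]; omega
    have hfold := PySem.List.foldl_pyRange_pyGetD'
      ((List.zipWith (fun a b => b - a) ((0:Int) :: (p :: q :: rest)) (p :: q :: rest)).take
        (rest.length + 1)) 0 max p (by norm_num : (0:Int) ≤ 1)
    rw [hEmidlen] at hfold
    push_cast at hfold
    rw [show (0:Int) + 1 = 1 from by norm_num, hmid, hfold]
    -- the final loop iteration
    unfold pvLoopBodyA
    rw [if_neg (by omega), if_pos (by rw [hlen2]; ring), pv_ite_max, pv_ite_max]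
    -- ===== reference side =====
    unfold pvGaps pvMaxOf
    rw [pv_diffs_concat 0 total (p :: q :: rest) (by simp), hE, List.cons_append]
    simp only [List.foldl_append, List.foldl_cons, List.foldl_nil]
    -- ===== reconcile =====
    have hgl : (p :: q :: rest : List Int).getLast (by simp)
        = PySem.List.pyGetD (p :: q :: rest) ((rest.length : Int) + 1) 0 := by
      rw [PySem.List.pyGetD_eq_getElem _ _ (by omega) (by rw [hlen2]; omega),
          List.getLast_eq_getElem]
      congr 1
    have hlastdiff :
        PySem.List.pyGetD (p :: q :: rest) ((rest.length : Int) + 1) 0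
          - PySem.List.pyGetD (p :: q :: rest) ((rest.length : Int) + 1 - 1) 0
        = (List.zipWith (fun a b => b - a) ((p : Int) :: q :: rest) (q :: rest)).getLast
            (by simp) := by
      rw [PySem.List.pyGetD_eq_getElem _ _ (by omega) (by rw [hlen2]; omega),
          PySem.List.pyGetD_eq_getElem _ _ (by omega) (by rw [hlen2]; omega),
          List.getLast_eq_getElem]
      have h1 : ((rest.length : Int) + 1).toNat = rest.length + 1 := by omega
      have h2 : ((rest.length : Int) + 1 - 1).toNat = rest.length := by omega
      simp only [h1, h2, hEtlen, Nat.add_sub_cancel]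
      simp only [List.getElem_zipWith, List.getElem_cons_succ]
    have hdrop : List.drop 1 (List.take (rest.length + 1)
          (p :: List.zipWith (fun a b => b - a) ((p : Int) :: q :: rest) (q :: rest)))
        = (List.zipWith (fun a b => b - a) ((p : Int) :: q :: rest) (q :: rest)).dropLast := by
      rw [List.take_succ_cons, List.dropLast_eq_take, hEtlen]
      simp
    rw [hdrop, hlastdiff, hgl,
        pv_foldl_max_last p (List.zipWith (fun a b => b - a) ((p : Int) :: q :: rest) (q :: rest))
          (by simp)]

-- pulling a max out of a left fold of max
theorem pv_foldl_max_pull (x : Int) (l : List Int) : ∀ y : Int,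
    l.foldl max (max x y) = max x (l.foldl max y) := by
  induction l with
  | nil => intro y; simp
  | cons a l ih =>
    intro y
    simp only [List.foldl_cons, max_assoc, ih (max y a)]

-- the maximum of a concatenation of nonempty lists
theorem pv_maxOf_append (a b : List Int) (ha : a ≠ []) (hb : b ≠ []) :
    pvMaxOf (a ++ b) = max (pvMaxOf a) (pvMaxOf b) := by
  match a, b with
  | d :: ds, e :: es =>
    simp only [pvMaxOf, List.cons_append, List.foldl_append, List.foldl_cons]
    rw [pv_foldl_max_pull]

theorem pv_gaps_ne_nil (prev nxt : Int) (pts : List Int) : pvGaps prev nxt pts ≠ [] := by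
  unfold pvGaps
  cases pts <;> simp

-- the boundary-gap list splits at an interior point
theorem pv_gaps_cons (prev nxt a : Int) (l : List Int) :
    pvGaps prev nxt (a :: l) = (a - prev) :: pvGaps a nxt l := by
  simp [pvGaps]

theorem pv_gaps_split (L : List Int) : ∀ (prev : Int) (q nxt : Int) (R : List Int),
    pvGaps prev nxt (L ++ q :: R) = pvGaps prev q L ++ pvGaps q nxt R := by
  induction L with
  | nil => intro prev q nxt R; simp [pvGaps]
  | cons a L ih =>
    intro prev q nxt R
    rw [List.cons_append, pv_gaps_cons, pv_gaps_cons, ih, List.cons_append]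

-- B's divide-and-conquer recursion computes the maximum of the boundary-gap list
theorem pv_go_eq_aux (k : Nat) : ∀ (pts : List Int), pts.length = k → ∀ (prev nxt : Int),
    pvGo pts prev nxt = pvMaxOf (pvGaps prev nxt pts) := by
  induction k using Nat.strong_induction_on with
  | _ k ih =>
    intro pts hk prev nxt
    match pts, hk with
    | [], hk => rw [pvGo]; simp [pvGaps, pvMaxOf]
    | p :: rest, hk =>
      have hm : (p :: rest).length / 2 < (p :: rest).length := by
        simp only [List.length_cons]; omega
      have hq : (p :: rest).getD ((p :: rest).length / 2) 0
          = (p :: rest)[(p :: rest).length / 2]'hm := List.getD_eq_getElem _ _ hm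
      have hsplit : (p :: rest).take ((p :: rest).length / 2)
          ++ (p :: rest).getD ((p :: rest).length / 2) 0
            :: (p :: rest).drop ((p :: rest).length / 2 + 1) = p :: rest := by
        rw [hq, ← List.drop_eq_getElem_cons hm, List.take_append_drop]
      have h1 : ((p :: rest).take ((p :: rest).length / 2)).length < k := by
        rw [← hk]; simp only [List.length_take, List.length_cons]; omega
      have h2 : ((p :: rest).drop ((p :: rest).length / 2 + 1)).length < k := by
        rw [← hk]; simp only [List.length_drop, List.length_cons]; omega
      rw [pvGo]
      rw [ih _ h1 _ rfl, ih _ h2 _ rfl]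
      conv_rhs => rw [← hsplit]
      rw [pv_gaps_split, pv_maxOf_append _ _ (pv_gaps_ne_nil _ _ _) (pv_gaps_ne_nil _ _ _)]
      rw [max_def]; split_ifs <;> omega

theorem pv_go_eq (pts : List Int) (prev nxt : Int) :
    pvGo pts prev nxt = pvMaxOf (pvGaps prev nxt pts) := pv_go_eq_aux pts.length pts rfl prev nxt

-- ===== VERDICT (by name: the statement is the Claim_ definition above) =====
theorem solution_spec : Claim_equal_solution := by
  intro n m x y _
  unfold Spec_solution solution solution_alt
  rw [pv_axis_eq n x, pv_axis_eq m y, pv_go_eq, pv_go_eq]
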